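-- pv_equiv track=rewrite | github.com/saklain-s/cognizantpracticePython | venv/Cognizant/lokeshPDF2/_12AdjacentSensors.py | adjacent_sensors
-- ===== SOURCE A (Python) =====
-- def adjacent_sensors(A, N):
--     result = []
--     for i in range(N):
--         cnt = 0
--         left = A[(i-1)%N]
--         right =A[(i+1)%N]
--         if left > A[i]:
--             cnt+=1
--         if right > A[i]:
--             cnt+=1
--         result.append(cnt)
--     return result
-- ===== SOURCE B (Python) =====
-- def adjacent_sensors(A, N):
--     # Scatter over the N circular edges: each edge (i, i+1) adds 1 to the strictly
--     # smaller endpoint's count, instead of gathering both neighbours per vertex.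
--     result = [0] * N
--     for i in range(N):
--         u = A[i]
--         v = A[(i + 1) % N]
--         if u > v:
--             result[(i + 1) % N] += 1
--         elif v > u:
--             result[i] += 1
--     return result
-- ===== Notes on version B (the rewrite author's own statement) =====
-- stated objective: alternative
-- what changed: B scatters over the N circular edges (each edge increments the count of its strictly smaller endpoint in a preallocated [0]*N array) instead of gathering the two neighbour comparisons per vertex as A does; same O(N) cost.
import Mathlib
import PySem

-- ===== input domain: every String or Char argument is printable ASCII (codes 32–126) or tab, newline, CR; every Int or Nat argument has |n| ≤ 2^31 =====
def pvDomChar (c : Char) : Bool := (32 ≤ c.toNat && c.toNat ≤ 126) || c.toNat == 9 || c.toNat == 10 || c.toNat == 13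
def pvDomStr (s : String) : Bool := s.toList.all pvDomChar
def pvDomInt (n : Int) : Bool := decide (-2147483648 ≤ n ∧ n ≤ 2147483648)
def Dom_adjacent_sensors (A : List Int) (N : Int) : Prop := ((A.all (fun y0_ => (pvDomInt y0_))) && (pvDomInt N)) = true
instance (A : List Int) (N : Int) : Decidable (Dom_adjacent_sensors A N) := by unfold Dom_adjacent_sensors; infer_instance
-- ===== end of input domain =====

-- B scatters over the N circular edges (each edge adds 1 to the count of its strictly smaller
-- endpoint in a preallocated [0]*N array) instead of gathering both neighbour comparisons per
-- vertex as A does; objective: alternative algorithm, same O(N) cost.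

-- ===== PORT A =====
def adjacent_sensors (A : List Int) (N : Int) : List Int :=
  (PySem.List.pyRange 0 N 1).foldl (fun result i =>
    let cnt : Int := 0
    let left := PySem.List.pyGetD A (PySem.Int.mod (i - 1) N) 0   -- Pre_ keeps these indices in range
    let right := PySem.List.pyGetD A (PySem.Int.mod (i + 1) N) 0
    let cnt := if left > PySem.List.pyGetD A i 0 then cnt + 1 else cnt
    let cnt := if right > PySem.List.pyGetD A i 0 then cnt + 1 else cnt
    result ++ [cnt]) []

-- ===== PORT B =====
-- Python 'result[j] += 1' on an in-range index j: read with pyGetD, write with pySetD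
-- (exact under Pre_, where every accessed index is in range).
def adjacent_sensors_alt (A : List Int) (N : Int) : List Int :=
  (PySem.List.pyRange 0 N 1).foldl (fun result i =>
    let u := PySem.List.pyGetD A i 0
    let v := PySem.List.pyGetD A (PySem.Int.mod (i + 1) N) 0
    if u > v then
      PySem.List.pySetD result (PySem.Int.mod (i + 1) N)
        (PySem.List.pyGetD result (PySem.Int.mod (i + 1) N) 0 + 1)
    else if v > u then
      PySem.List.pySetD result i (PySem.List.pyGetD result i 0 + 1)
    else result) (List.replicate N.toNat 0)

-- ===== PRECONDITION & SPEC =====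
-- Pre_ excludes exactly the inputs where Python A raises IndexError: N > len(A)
-- (for 0 < N the accessed indices are 0..N-1, so N ≤ len(A) suffices; for N ≤ 0 nothing is indexed).
def Pre_adjacent_sensors (A : List Int) (N : Int) : Prop := N ≤ (A.length : Int)
instance (A : List Int) (N : Int) : Decidable (Pre_adjacent_sensors A N) := by unfold Pre_adjacent_sensors; infer_instance
def pvWitness_adjacent_sensors : List Int × Int := ([3, 1, 2], 3)

def Spec_adjacent_sensors (A : List Int) (N : Int) (out : List Int) : Prop := out = adjacent_sensors_alt A N
instance (A : List Int) (N : Int) (out : List Int) : Decidable (Spec_adjacent_sensors A N out) := by unfold Spec_adjacent_sensors; infer_instance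

-- ===== CLAIM (what is proved, stated in full; the proofs are below) =====
def Claim_equal_adjacent_sensors : Prop := ∀ (A : List Int) (N : Int), Dom_adjacent_sensors A N → Pre_adjacent_sensors A N → Spec_adjacent_sensors A N (adjacent_sensors A N)

-- ===== LEMMAS AND PROOFS =====

-- circular successor / predecessor of an index j < n
def pvNext (n j : Nat) : Nat := if j + 1 = n then 0 else j + 1
def pvPrev (n j : Nat) : Nat := if j = 0 then n - 1 else j - 1

-- count at vertex j after the first m circular edges have been processed
def pvF (A : List Int) (n m j : Nat) : Int :=
  (if pvPrev n j < m ∧ A.getD (pvPrev n j) 0 > A.getD j 0 then 1 else 0) +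
  (if j < m ∧ A.getD (pvNext n j) 0 > A.getD j 0 then 1 else 0)

theorem pvNext_lt (n j : Nat) (hn : 0 < n) (hj : j < n) : pvNext n j < n := by
  unfold pvNext; split <;> omega

theorem pvPrev_lt (n j : Nat) (hn : 0 < n) (hj : j < n) : pvPrev n j < n := by
  unfold pvPrev; split <;> omega

theorem pvPrev_eq_iff (n j m : Nat) (hj : j < n) (hm : m < n) :
    pvPrev n j = m ↔ j = pvNext n m := by
  unfold pvPrev pvNext; split <;> split <;> omega

theorem mod_succ_cast (n j : Nat) (hj : j < n) :
    PySem.Int.mod ((j : Int) + 1) (n : Int) = ((pvNext n j : Nat) : Int) := by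
  have h : ((j : Int) + 1) = ((j + 1 : Nat) : Int) := by push_cast; ring
  rw [h, PySem.Int.mod_natCast]
  unfold pvNext
  split
  · rename_i h1; rw [h1, Nat.mod_self]
  · rw [Nat.mod_eq_of_lt (by omega)]

theorem mod_pred_cast (n j : Nat) (hn : 0 < n) (hj : j < n) :
    PySem.Int.mod ((j : Int) - 1) (n : Int) = ((pvPrev n j : Nat) : Int) := by
  have hnpos : (0 : Int) < (n : Int) := by exact_mod_cast hn
  have hcast : ((j + n - 1 : Nat) : Int) = (j : Int) + (n : Int) - 1 := by omega
  have : PySem.Int.mod ((j : Int) - 1) ((n : Int)) = (((j + n - 1) % n : Nat) : Int) := by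
    calc PySem.Int.mod ((j:Int) - 1) ((n:Int)) = ((j:Int) - 1) % (n:Int) :=
          PySem.Int.mod_eq_emod_of_pos hnpos
      _ = ((j:Int) - 1 + (n:Int)) % (n:Int) := (Int.add_emod_right _ _).symm
      _ = ((j + n - 1 : Nat) : Int) % ((n : Nat) : Int) := by rw [hcast]; ring_nf
      _ = (((j + n - 1) % n : Nat) : Int) := by norm_cast
  rw [this]
  congr 1
  unfold pvPrev
  split
  · rename_i h1; subst h1; simp [Nat.mod_eq_of_lt (show n - 1 < n by omega)]
  · rename_i h1
    rw [show j + n - 1 = (j - 1) + n by omega, Nat.add_mod_right,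
      Nat.mod_eq_of_lt (by omega)]

-- A's per-vertex gather equals pvF at m = n
theorem a_side (A : List Int) (n : Nat) (hn : 0 < n) :
    adjacent_sensors A (n : Int) = (List.range n).map (pvF A n n) := by
  rw [adjacent_sensors, PySem.List.pyRange_one, PySem.List.foldl_append_singleton_eq_map]
  norm_num
  intro j hjn
  rw [mod_succ_cast n j hjn, mod_pred_cast n j hn hjn]
  simp only [PySem.List.pyGetD_natCast]
  unfold pvF
  have h1 : pvPrev n j < n := pvPrev_lt n j hn hjn
  simp only [List.getD_eq_getElem?_getD]
  split_ifs <;> omega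

-- the B loop invariant: after the first m edges the counts are pvF A n m
theorem b_inv (A : List Int) (n : Nat) (hn : 0 < n) (m : Nat) (hm : m ≤ n) :
    (List.range m).foldl (fun result (k : Nat) =>
      let u := PySem.List.pyGetD A ((k : Int)) 0
      let v := PySem.List.pyGetD A (PySem.Int.mod ((k : Int) + 1) (n : Int)) 0
      if u > v then
        PySem.List.pySetD result (PySem.Int.mod ((k : Int) + 1) (n : Int))
          (PySem.List.pyGetD result (PySem.Int.mod ((k : Int) + 1) (n : Int)) 0 + 1)
      else if v > u then
        PySem.List.pySetD result ((k : Int)) (PySem.List.pyGetD result ((k : Int)) 0 + 1)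
      else result) (List.replicate n 0) = (List.range n).map (pvF A n m) := by
  induction m with
  | zero =>
    apply List.ext_getElem
    · simp
    · intro i h1 h2
      simp [pvF]
  | succ m ih =>
    have hmn : m < n := by omega
    rw [List.range_succ, List.foldl_append, ih (by omega)]
    simp only [List.foldl_cons, List.foldl_nil]
    have hnext := pvNext_lt n m hn hmn
    have hgA : PySem.List.pyGetD A ((m : Int)) 0 = A.getD m 0 := PySem.List.pyGetD_natCast ..
    have hmod := mod_succ_cast n m hmn
    have hlenmap : ((List.range n).map (pvF A n m)).length = n := by simp
    have hget : ∀ k, k < n → ((List.range n).map (pvF A n m)).getD k 0 = pvF A n m k := by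
      intro k hk
      rw [List.getD_eq_getElem _ _ (by simpa using hk)]
      simp
    have hset : ∀ k w, k < n → PySem.List.pySetD ((List.range n).map (pvF A n m)) ((k : Int)) w
        = (List.range n).map (fun j => if j = k then w else pvF A n m j) := by
      intro k w hk
      rw [PySem.List.pySetD_natCast]
      apply List.ext_getElem
      · simp
      · intro i h1 h2
        rw [List.getElem_set]
        simp only [List.getElem_map, List.getElem_range]
        rcases eq_or_ne k i with h | h
        · simp [h]
        · rw [if_neg h, if_neg (fun hh => h hh.symm)]
    simp only [hmod, hgA, PySem.List.pyGetD_natCast, hget (pvNext n m) hnext]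
    by_cases huv : A.getD m 0 > A.getD (pvNext n m) 0
    · rw [if_pos huv, hset (pvNext n m) _ hnext]
      refine List.map_congr_left ?_
      intro j hj
      have hjn : j < n := List.mem_range.mp hj
      have hiff := pvPrev_eq_iff n j m hjn hmn
      by_cases hjk : j = pvNext n m
      · rw [if_pos hjk, ← hjk]
        rw [← hjk] at huv
        have hp : pvPrev n j = m := hiff.mpr hjk
        have hjm : j ≠ m := by
          intro hjm; rw [hjm] at huv; exact lt_irrefl _ huv
        unfold pvF
        rw [hp]
        split_ifs <;> omega
      · rw [if_neg hjk]
        have hp : pvPrev n j ≠ m := fun h => hjk (hiff.mp h)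
        unfold pvF
        by_cases hjm : j = m
        · rw [hjm] at hp ⊢
          split_ifs <;> omega
        · split_ifs <;> omega
    · rw [if_neg huv]
      by_cases hvu : A.getD (pvNext n m) 0 > A.getD m 0
      · rw [if_pos hvu, hget m hmn, hset m _ hmn]
        refine List.map_congr_left ?_
        intro j hj
        have hjn : j < n := List.mem_range.mp hj
        have hiff := pvPrev_eq_iff n j m hjn hmn
        by_cases hjm : j = m
        · rw [if_pos hjm, hjm]
          have hp : pvPrev n m ≠ m := by
            intro h
            rw [← (pvPrev_eq_iff n m m hmn hmn).mp h] at hvu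
            exact lt_irrefl _ hvu
          unfold pvF
          split_ifs <;> omega
        · rw [if_neg hjm]
          unfold pvF
          by_cases hp : pvPrev n j = m
          · have hjk : j = pvNext n m := hiff.mp hp
            rw [hjk] at hjm
            rw [hp, hjk]
            split_ifs <;> omega
          · split_ifs <;> omega
      · rw [if_neg hvu]
        refine List.map_congr_left ?_
        intro j hj
        have hjn : j < n := List.mem_range.mp hj
        have hiff := pvPrev_eq_iff n j m hjn hmn
        unfold pvF
        by_cases hp : pvPrev n j = m
        · have hjk : j = pvNext n m := hiff.mp hp
          by_cases hjm : j = m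
          · rw [hp, hjm]
            split_ifs <;> omega
          · rw [hjk] at hjm
            rw [hp, hjk]
            split_ifs <;> omega
        · by_cases hjm : j = m
          · rw [hjm] at hp ⊢
            split_ifs <;> omega
          · split_ifs <;> omega

theorem adj_main (A : List Int) (N : Int) (hN : 0 < N) (hlen : N ≤ (A.length : Int)) :
    adjacent_sensors A N = adjacent_sensors_alt A N := by
  obtain ⟨n, rfl⟩ : ∃ n : Nat, N = (n : Int) := ⟨N.toNat, (Int.toNat_of_nonneg hN.le).symm⟩
  have hn0 : 0 < n := by exact_mod_cast hN
  have hlen' : n ≤ A.length := by exact_mod_cast hlen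
  rw [a_side A n hn0, adjacent_sensors_alt, PySem.List.pyRange_one]
  norm_num
  rw [List.foldl_map]
  exact (b_inv A n hn0 n le_rfl).symm

-- ===== VERDICT (by name: the statement is the Claim_ definition above) =====
theorem adjacent_sensors_spec : Claim_equal_adjacent_sensors := by
  intro A N _ hpre
  unfold Spec_adjacent_sensors
  by_cases hN : 0 < N
  · exact adj_main A N hN hpre
  · rw [adjacent_sensors, adjacent_sensors_alt,
      PySem.List.pyRange_one_eq_nil (by omega : N ≤ 0)]
    simp [Int.toNat_of_nonpos (by omega : N ≤ 0)]
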